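-- pv_equiv track=rewrite | github.com/dawoonykim/python_dowoonyKim | 24.12.09/programmers_codingtest23.py | solution
-- ===== SOURCE A (Python) =====
-- def solution(order):
--     answer = 0
--     for i in order:
--         if "cafelatte" in i:
--             answer += 5000
--         elif "americano" or "anything" in i:
--             answer += 4500
--     return answer
-- ===== SOURCE B (Python) =====
-- # Divide-and-conquer: split the order list in half, price each half recursively
-- # (A's `elif "americano" or ...` is always truthy, so non-latte items add 4500).
-- def solution(order):
--     n = len(order)
--     if n == 0:
--         return 0
--     if n == 1:
--         return 5000 if "cafelatte" in order[0] else 4500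
--     mid = n // 2
--     return solution(order[:mid]) + solution(order[mid:])
-- ===== Notes on version B (the rewrite author's own statement) =====
-- stated objective: alternative
-- what changed: Replaces A's single accumulating loop with a divide-and-conquer recursion: split the list in half, price each half recursively, add the results (base cases: empty list 0, singleton priced 5000 if it contains 'cafelatte' else 4500, matching A's always-truthy elif).
import Mathlib
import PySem

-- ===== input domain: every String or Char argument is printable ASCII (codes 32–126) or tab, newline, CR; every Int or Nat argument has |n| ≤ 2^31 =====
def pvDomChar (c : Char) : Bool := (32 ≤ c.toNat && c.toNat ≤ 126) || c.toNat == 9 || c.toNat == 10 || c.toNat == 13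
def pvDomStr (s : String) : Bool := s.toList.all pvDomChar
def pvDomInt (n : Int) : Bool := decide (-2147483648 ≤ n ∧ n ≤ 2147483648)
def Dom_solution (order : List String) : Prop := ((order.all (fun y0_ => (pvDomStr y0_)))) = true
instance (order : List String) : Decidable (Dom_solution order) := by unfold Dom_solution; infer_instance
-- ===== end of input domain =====

-- B replaces A's single accumulating loop by a divide-and-conquer recursion over list halves (objective: alternative).


-- ===== PORT A =====
-- A's `elif "americano" or "anything" in i` has a truthy string first, so it always fires.
def solution (order : List String) : Int :=
  order.foldl (fun answer i =>
    if PySem.Str.isIn "cafelatte" i then answer + 5000 else answer + 4500) 0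

-- ===== PORT B =====
-- order[:mid] / order[mid:] with 0 ≤ mid ≤ n are exactly List.take mid / List.drop mid;
-- the fuel (= order.length, halving strictly shrinks it) only makes the recursion structural.
def pvDC (fuel : Nat) (order : List String) : Int :=
  match fuel with
  | 0 => 0  -- never reached when order.length ≤ fuel is maintained
  | fuel + 1 =>
    if order.length = 0 then 0
    else if order.length = 1 then
      if PySem.Str.isIn "cafelatte" (order.headI) then 5000 else 4500
    else
      pvDC fuel (order.take (order.length / 2)) + pvDC fuel (order.drop (order.length / 2))

def solution_alt (order : List String) : Int :=
  pvDC order.length order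

-- ===== PRECONDITION & SPEC =====
def Spec_solution (order : List String) (out : Int) : Prop := out = solution_alt order
instance (order : List String) (out : Int) : Decidable (Spec_solution order out) := by unfold Spec_solution; infer_instance

-- ===== CLAIM (what is proved, stated in full; the proofs are below) =====
def Claim_equal_solution : Prop := ∀ (order : List String), Dom_solution order → Spec_solution order (solution order)

-- ===== LEMMAS AND PROOFS =====
def pvPrice (i : String) : Int :=
  if PySem.Str.isIn "cafelatte" i then 5000 else 4500

theorem solution_foldl (order : List String) (acc : Int) :
    order.foldl (fun answer i =>
      if PySem.Str.isIn "cafelatte" i then answer + 5000 else answer + 4500) acc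
    = acc + (order.map pvPrice).sum := by
  induction order generalizing acc with
  | nil => simp
  | cons h t ih =>
    simp only [List.foldl_cons, List.map_cons, List.sum_cons, ih, pvPrice]
    split_ifs <;> ring

theorem pvDC_sum (fuel : Nat) (order : List String) (hle : order.length ≤ fuel) :
    pvDC fuel order = (order.map pvPrice).sum := by
  induction fuel generalizing order with
  | zero =>
    rw [Nat.le_zero] at hle
    rw [List.length_eq_zero_iff.mp hle]; rfl
  | succ fuel ih =>
    rw [pvDC]
    by_cases h0 : order.length = 0
    · rw [List.length_eq_zero_iff.mp h0]; simp
    by_cases h1 : order.length = 1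
    · obtain ⟨x, hx⟩ := List.length_eq_one_iff.mp h1
      subst hx
      simp [pvPrice]
    · simp only [h0, h1, if_false]
      rw [ih _ (by simp only [List.length_take]; omega),
          ih _ (by simp only [List.length_drop]; omega),
          ← List.sum_append, ← List.map_append, List.take_append_drop]

theorem solution_alt_sum (order : List String) :
    solution_alt order = (order.map pvPrice).sum :=
  pvDC_sum order.length order le_rfl

-- ===== VERDICT (by name: the statement is the Claim_ definition above) =====
theorem solution_spec : Claim_equal_solution := by
  intro order _
  unfold Spec_solution solution
  rw [solution_foldl, solution_alt_sum]; ring
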